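-- pv_equiv track=rewrite | github.com/JoydeepMallick/CODECHEF | CODECHEF STARTERS 47B DIV 2/cpypush.py | break_check
-- ===== SOURCE A (Python) =====
-- def break_check(a):
--     if len(a) in [0,1]:
--         return True
--     elif len(a)%2:# odd no of elements
--         return break_check(a[:-1]) # remove last element and recheck
--     elif a[:len(a)//2] == a[len(a)//2 : ] : # if even no of elements check if halves are equal
--         return break_check(a[:len(a)//2])
--     else:
--         return False
-- ===== SOURCE B (Python) =====
-- def break_check(a):
--     n = len(a)
--     while n > 1:
--         if n % 2:
--             n -= 1
--         else:
--             half = n // 2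
--             if a[:half] == a[half:n]:
--                 n = half
--             else:
--                 return False
--     return True
-- ===== Notes on version B (the rewrite author's own statement) =====
-- stated objective: alternative
-- what changed: Replaced the recursion that rebuilds shrinking prefix copies of the list with an iterative loop that only tracks the current prefix length n and slices the original list.
import Mathlib
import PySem

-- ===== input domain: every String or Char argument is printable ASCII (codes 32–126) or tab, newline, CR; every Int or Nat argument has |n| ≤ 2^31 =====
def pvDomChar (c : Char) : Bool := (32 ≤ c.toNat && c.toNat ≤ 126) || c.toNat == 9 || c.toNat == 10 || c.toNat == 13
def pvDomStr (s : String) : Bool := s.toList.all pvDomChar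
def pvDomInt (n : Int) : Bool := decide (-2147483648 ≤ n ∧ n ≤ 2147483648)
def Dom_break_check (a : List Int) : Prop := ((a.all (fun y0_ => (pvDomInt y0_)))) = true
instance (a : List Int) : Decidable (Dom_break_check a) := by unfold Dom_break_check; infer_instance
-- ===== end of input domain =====

-- B replaces A's recursion on shrinking list copies by an iterative loop over the prefix length only (alternative decomposition).

-- ===== PORT A =====
-- literal port of A: recursion on the list, slices via PySem
def break_check (a : List Int) : Bool :=
  if a.length = 0 ∨ a.length = 1 then true
  else if a.length % 2 = 1 then
    break_check (PySem.List.slice a none (some (-1)))          -- a[:-1]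
  else if PySem.List.slice a none (some (PySem.Int.floordiv (a.length : Int) 2)) =
          PySem.List.slice a (some (PySem.Int.floordiv (a.length : Int) 2)) none then
    break_check (PySem.List.slice a none (some (PySem.Int.floordiv (a.length : Int) 2)))
  else false
termination_by a.length
decreasing_by
  · simp only [PySem.List.slice_to_neg_one]
    simp [List.length_dropLast]; omega
  · have : PySem.Int.floordiv (a.length : Int) 2 = ((a.length / 2 : Nat) : Int) := by
      exact_mod_cast PySem.Int.floordiv_natCast a.length 2
    rw [this, PySem.List.slice_to_natCast]
    simp [List.length_take]; omega

-- ===== PORT B =====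
-- the while loop of Source B: state is the current prefix length n
def bcLoop (a : List Int) (n : Nat) : Bool :=
  if n ≤ 1 then true
  else if n % 2 = 1 then bcLoop a (n - 1)
  else
    let half := n / 2
    if PySem.List.slice a none (some (half : Int)) =
       PySem.List.slice a (some (half : Int)) (some (n : Int)) then
      bcLoop a half
    else false
termination_by n
decreasing_by all_goals omega

def break_check_alt (a : List Int) : Bool := bcLoop a a.length

-- ===== PRECONDITION & SPEC =====
def Spec_break_check (a : List Int) (out : Bool) : Prop := out = break_check_alt a
instance (a : List Int) (out : Bool) : Decidable (Spec_break_check a out) := by unfold Spec_break_check; infer_instance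

-- ===== CLAIM (what is proved, stated in full; the proofs are below) =====
def Claim_equal_break_check : Prop := ∀ (a : List Int), Dom_break_check a → Spec_break_check a (break_check a)

-- ===== LEMMAS AND PROOFS =====

theorem bc_floordiv (n : Nat) :
    PySem.Int.floordiv (n : Int) 2 = ((n / 2 : Nat) : Int) := by
  exact_mod_cast PySem.Int.floordiv_natCast n 2

-- loop invariant: bcLoop on n computes A's answer on the prefix a.take n
theorem bcLoop_eq_break_check_take (a : List Int) (n : Nat) (hn : n ≤ a.length) :
    bcLoop a n = break_check (a.take n) := by
  induction n using Nat.strong_induction_on with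
  | _ n ih =>
    rw [bcLoop, break_check]
    have hlen : (a.take n).length = n := by simp [List.length_take]; omega
    by_cases h1 : n ≤ 1
    · simp [h1, hlen]; omega
    · simp only [if_neg h1, hlen]
      rw [if_neg (show ¬ (n = 0 ∨ n = 1) by omega)]
      by_cases hodd : n % 2 = 1
      · simp only [if_pos hodd]
        rw [PySem.List.slice_to_neg_one, List.dropLast_eq_take, hlen, List.take_take,
            Nat.min_def, if_pos (by omega : n - 1 ≤ n)]
        exact ih (n - 1) (by omega) (by omega)
      · simp only [if_neg hodd, bc_floordiv]
        rw [PySem.List.slice_to_natCast, PySem.List.slice_to_natCast,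
            PySem.List.slice_from_natCast, PySem.List.slice_natCast,
            List.take_take, List.drop_take, Nat.min_def]
        have hh : n / 2 ≤ n := Nat.div_le_self n 2
        rw [if_pos hh]
        by_cases heq : a.take (n / 2) = (a.drop (n / 2)).take (n - n / 2)
        · simp only [if_pos heq]
          exact ih (n / 2) (by omega) (by omega)
        · simp [heq]

-- ===== VERDICT (by name: the statement is the Claim_ definition above) =====
theorem break_check_spec : Claim_equal_break_check := by
  intro a _
  show break_check a = break_check_alt a
  rw [break_check_alt, bcLoop_eq_break_check_take a a.length le_rfl, List.take_length]
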